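-- pv_equiv track=rewrite | github.com/alirezaamir/FETCH | src/code/channel_possibility.py | generate_edge_weights
-- ===== SOURCE A (Python) =====
-- def generate_edge_weights(num_channels_in_wearable):
--     edge_weights = []
--     total_bits = 20
--
--     # Generate all combinations of 1s and 0s
--     for i in range((2 ** total_bits)):
--         binary_str = bin(i)[2:].zfill(total_bits)
--
--         # Count the number of 1s
--         if binary_str.count('1') == num_channels_in_wearable:
--             edge_weights.append([int(bit) for bit in binary_str])
--
--     return edge_weights
-- ===== SOURCE B (Python) =====
-- def generate_edge_weights(num_channels_in_wearable):
--     # DFS over bit positions (MSB first, 0-branch before 1-branch => ascending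
--     # integer order), pruning branches that cannot reach the required count.
--     out = []
--     pattern = []
--
--     def rec(n, j):  # n bits still to place, j ones still needed
--         if j < 0 or j > n:
--             return
--         if n == 0:
--             out.append(pattern.copy())
--             return
--         pattern.append(0)
--         rec(n - 1, j)
--         pattern.pop()
--         pattern.append(1)
--         rec(n - 1, j - 1)
--         pattern.pop()
--
--     rec(20, num_channels_in_wearable)
--     return out
-- ===== Notes on version B (the rewrite author's own statement) =====
-- stated objective: faster
-- what changed: A scans all 2^20 integers, formats each as a zero-filled binary string and keeps those with k ones; B does a pruned depth-first search over the 20 bit positions (0-branch before 1-branch, so patterns appear in the same ascending integer order), building each pattern once and never touching strings.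
import Mathlib
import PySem

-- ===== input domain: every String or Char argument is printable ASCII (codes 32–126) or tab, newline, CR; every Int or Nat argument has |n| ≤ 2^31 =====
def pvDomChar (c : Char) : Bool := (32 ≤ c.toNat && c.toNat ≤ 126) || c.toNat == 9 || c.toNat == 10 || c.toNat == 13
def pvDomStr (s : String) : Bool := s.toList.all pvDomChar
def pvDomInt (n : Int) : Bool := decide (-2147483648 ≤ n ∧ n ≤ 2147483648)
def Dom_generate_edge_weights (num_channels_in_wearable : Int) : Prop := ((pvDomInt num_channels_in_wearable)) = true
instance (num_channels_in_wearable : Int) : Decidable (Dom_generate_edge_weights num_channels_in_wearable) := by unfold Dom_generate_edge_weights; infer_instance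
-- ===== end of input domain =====

-- B replaces the scan of all 2^20 bit strings by a pruned DFS over bit positions
-- (MSB first, 0-branch before 1-branch, so patterns come out in the same ascending
-- integer order); objective: faster.

-- ===== PORT A =====

-- int(bit): hand-ported as ord(bit) - ord('0'); exact on the digit characters '0'/'1'
-- that a binary string consists of (int() raises on nothing else reached here)
def pvIntOfBit (bit : Char) : Int := (bit.toNat : Int) - ('0'.toNat : Int)

-- The loop appends matching rows to edge_weights; ported as a tail fold that conses
-- each appended row and reverses once at the end — the same list in the same order
-- (the literal `acc ++ [row]` shape is quadratic and does not evaluate in time).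
-- binary_str.count('1'): the needle is the single character '1', so the substring
-- count is exactly List.count '1' binary_str.
def generate_edge_weights (num_channels_in_wearable : Int) : List (List Int) :=
  ((PySem.List.pyRange 0 (2 ^ 20) 1).foldl (fun edge_weights i =>
    -- bin(i)[2:] = format(i, 'b') = PySem.Int.toBinChars i (i ≥ 0 throughout the range)
    let binary_str := PySem.Chars.zfill (PySem.Int.toBinChars i) 20
    if (List.count '1' binary_str : Int) == num_channels_in_wearable then
      binary_str.map pvIntOfBit :: edge_weights
    else edge_weights) []).reverse

-- ===== PORT B =====

-- rec(n, j): n bits still to place, j ones still needed; `pattern`/`out` are the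
-- mutable accumulators of Source B passed explicitly.
def pvRecB : Nat → Int → List Int → List (List Int) → List (List Int)
  | 0, j, pattern, out =>
      if j < 0 ∨ (0 : Int) < j then out else out ++ [pattern]
  | m + 1, j, pattern, out =>
      if j < 0 ∨ ((m : Int) + 1) < j then out
      else pvRecB m (j - 1) (pattern ++ [1]) (pvRecB m j (pattern ++ [0]) out)

def generate_edge_weights_alt (num_channels_in_wearable : Int) : List (List Int) :=
  pvRecB 20 num_channels_in_wearable [] []

-- ===== PRECONDITION & SPEC =====
def Spec_generate_edge_weights (num_channels_in_wearable : Int) (out : List (List Int)) : Prop := out = generate_edge_weights_alt num_channels_in_wearable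
instance (num_channels_in_wearable : Int) (out : List (List Int)) : Decidable (Spec_generate_edge_weights num_channels_in_wearable out) := by unfold Spec_generate_edge_weights; infer_instance

-- ===== CLAIM (what is proved, stated in full; the proofs are below) =====
def Claim_equal_generate_edge_weights : Prop := ∀ (num_channels_in_wearable : Int), Dom_generate_edge_weights num_channels_in_wearable → Spec_generate_edge_weights num_channels_in_wearable (generate_edge_weights num_channels_in_wearable)

-- ===== LEMMAS AND PROOFS =====

-- ---- the binary writer bin(i)[2:] as a structural recursion ----
def pvGo (n : Nat) : List Char :=
  if h : n / 2 = 0 then [Nat.digitChar (n % 2)]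
  else pvGo (n / 2) ++ [Nat.digitChar (n % 2)]
termination_by n
decreasing_by exact Nat.div_lt_self (by omega) (by omega)

lemma pv_toDigitsCore_eq : ∀ (fuel n : Nat) (acc : List Char), n < fuel →
    Nat.toDigitsCore 2 fuel n acc = pvGo n ++ acc := by
  intro fuel
  induction fuel with
  | zero => intro n acc h; omega
  | succ f ih =>
    intro n acc h
    rw [Nat.toDigitsCore]
    by_cases h2 : n / 2 = 0
    · simp [h2, pvGo]
    · simp only [h2, if_false]
      rw [ih (n / 2) _ (by omega)]
      conv_rhs => rw [pvGo, dif_neg h2]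
      rw [List.append_assoc]
      rfl

lemma pv_toDigits2_eq (n : Nat) : Nat.toDigits 2 n = pvGo n := by
  rw [Nat.toDigits, pv_toDigitsCore_eq (n + 1) n [] (by omega), List.append_nil]

-- ---- the n-bit zero-filled binary string ----
def pvBits : Nat → Nat → List Char
  | 0, _ => []
  | m + 1, n => pvBits m (n / 2) ++ [Nat.digitChar (n % 2)]

lemma pvBits_zero (N : Nat) : pvBits N 0 = List.replicate N '0' := by
  induction N with
  | zero => rfl
  | succ m ih =>
    rw [pvBits, Nat.zero_div, Nat.zero_mod, ih, List.replicate_succ',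
      show Nat.digitChar 0 = '0' from rfl]

lemma pvGo_head (n : Nat) : ∃ t, pvGo n = '0' :: t ∨ pvGo n = '1' :: t := by
  induction n using Nat.strong_induction_on with
  | _ n ih =>
    rw [pvGo]
    by_cases h2 : n / 2 = 0
    · simp only [h2, dif_pos]
      have hm : n % 2 = 0 ∨ n % 2 = 1 := by omega
      rcases hm with h | h <;> rw [h]
      · exact ⟨[], Or.inl rfl⟩
      · exact ⟨[], Or.inr rfl⟩
    · simp only [h2]
      obtain ⟨t, ht⟩ := ih (n / 2) (Nat.div_lt_self (by omega) (by omega))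
      rcases ht with h | h <;> rw [h]
      · exact ⟨t ++ [Nat.digitChar (n % 2)], Or.inl rfl⟩
      · exact ⟨t ++ [Nat.digitChar (n % 2)], Or.inr rfl⟩

lemma pv_zfill_pvGo (n : Nat) (w : Int) :
    PySem.Chars.zfill (pvGo n) w =
      List.replicate (w.toNat - (pvGo n).length) '0' ++ pvGo n := by
  obtain ⟨t, ht⟩ := pvGo_head n
  rw [PySem.Chars.zfill.eq_def]
  by_cases hw : w ≤ ((pvGo n).length : Int)
  · rw [if_pos hw]
    have : w.toNat - (pvGo n).length = 0 := by omega
    rw [this, List.replicate_zero, List.nil_append]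
  · rw [if_neg hw]
    rcases ht with h | h <;> rw [h] <;> simp

lemma pv_pad_eq : ∀ (N n : Nat), n < 2 ^ N → 0 < N →
    List.replicate (N - (pvGo n).length) '0' ++ pvGo n = pvBits N n := by
  intro N
  induction N with
  | zero => intro n _ h; omega
  | succ M ih =>
    intro n hn _
    by_cases h2 : n / 2 = 0
    · have hb : pvBits M (n / 2) = List.replicate M '0' := by rw [h2, pvBits_zero]
      rw [pvGo, dif_pos h2, pvBits, hb]
      simp [List.replicate_succ']
    · have hM : 0 < M := by
        by_contra h
        have : M = 0 := by omega
        subst this; omega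
      have hdiv : n / 2 < 2 ^ M := by
        have : n < 2 ^ (M + 1) := hn
        omega
      rw [pvGo, dif_neg h2, pvBits]
      have hlen : (pvGo (n / 2) ++ [Nat.digitChar (n % 2)]).length = (pvGo (n / 2)).length + 1 := by
        simp
      rw [hlen]
      have : M + 1 - ((pvGo (n / 2)).length + 1) = M - (pvGo (n / 2)).length := by omega
      rw [this, ← List.append_assoc, ih (n / 2) hdiv hM]

lemma pvBits_low : ∀ (N n : Nat), n < 2 ^ N → pvBits (N + 1) n = '0' :: pvBits N n := by
  intro N
  induction N with
  | zero =>
    intro n hn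
    interval_cases n
    rfl
  | succ M ih =>
    intro n hn
    have hdiv : n / 2 < 2 ^ M := by
      have : n < 2 ^ (M + 1) := hn
      omega
    show pvBits (M + 1 + 1) n = _
    rw [pvBits, ih (n / 2) hdiv, pvBits]
    rfl

lemma pvBits_high : ∀ (N n : Nat), n < 2 ^ N → pvBits (N + 1) (n + 2 ^ N) = '1' :: pvBits N n := by
  intro N
  induction N with
  | zero =>
    intro n hn
    interval_cases n
    rfl
  | succ M ih =>
    intro n hn
    have hdiv : n / 2 < 2 ^ M := by
      have : n < 2 ^ (M + 1) := hn
      omega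
    have hq : (n + 2 ^ (M + 1)) / 2 = n / 2 + 2 ^ M := by
      have : (2 : Nat) ^ (M + 1) = 2 ^ M * 2 := by ring
      omega
    have hr : (n + 2 ^ (M + 1)) % 2 = n % 2 := by
      have : (2 : Nat) ^ (M + 1) = 2 ^ M * 2 := by ring
      omega
    show pvBits (M + 1 + 1) _ = _
    rw [pvBits, hq, hr, ih (n / 2) hdiv, pvBits]
    rfl

-- ---- B's DFS against the clean recursion pvComb ----
def pvComb : Nat → Int → List (List Int)
  | 0, j => if j = 0 then [[]] else []
  | m + 1, j => (pvComb m j).map (fun p => 0 :: p) ++ (pvComb m (j - 1)).map (fun p => 1 :: p)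

lemma pvComb_nil : ∀ (n : Nat) (j : Int), (j < 0 ∨ (n : Int) < j) → pvComb n j = [] := by
  intro n
  induction n with
  | zero => intro j h; rw [pvComb, if_neg (by omega)]
  | succ m ih =>
    intro j h
    rw [pvComb, ih j (by omega), ih (j - 1) (by push_cast at h ⊢; omega)]
    rfl

lemma pvRecB_eq : ∀ (n : Nat) (j : Int) (pattern : List Int) (out : List (List Int)),
    pvRecB n j pattern out = out ++ (pvComb n j).map (fun p => pattern ++ p) := by
  intro n
  induction n with
  | zero =>
    intro j pattern out
    rw [pvRecB]
    by_cases h : j < 0 ∨ (0 : Int) < j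
    · rw [if_pos h, pvComb, if_neg (by omega)]; simp
    · rw [if_neg h, pvComb, if_pos (by omega)]; simp
  | succ m ih =>
    intro j pattern out
    rw [pvRecB]
    by_cases h : j < 0 ∨ ((m : Int) + 1) < j
    · rw [if_pos h, pvComb_nil (m + 1) j (by push_cast; omega)]; simp
    · rw [if_neg h, ih, ih, pvComb]
      simp [List.map_map, Function.comp_def]

-- ---- A's filtered range against pvComb ----
lemma pvIntOfBit_zero : pvIntOfBit '0' = 0 := by decide

lemma pvIntOfBit_one : pvIntOfBit '1' = 1 := by decide

-- loop shape of the ported A: cons on match, reversed at the end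
lemma pv_foldl_cons_if {α β : Type} (p : α → Bool) (f : α → β) :
    ∀ (l : List α) (acc : List β),
      l.foldl (fun acc x => if p x then f x :: acc else acc) acc
        = ((l.filter p).map f).reverse ++ acc := by
  intro l
  induction l with
  | nil => intro acc; simp
  | cons x xs ih =>
    intro acc
    rw [List.foldl_cons, List.filter_cons]
    by_cases hp : p x
    · simp only [hp, if_true, ih (f x :: acc)]
      simp
    · simp only [hp, Bool.false_eq_true, if_false, ih acc]

lemma pv_A_filter : ∀ (N : Nat) (k : Int),
    ((List.range (2 ^ N)).filter
        (fun i => ((((pvBits N i).count '1' : Nat) : Int) == k))).map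
      (fun i => (pvBits N i).map pvIntOfBit) = pvComb N k := by
  intro N
  induction N with
  | zero =>
    intro k
    by_cases hk : k = 0 <;> simp [pvComb, pvBits, hk]
    simp [Ne.symm hk]
  | succ M ih =>
    intro k
    have h2 : (2 : Nat) ^ (M + 1) = 2 ^ M + 2 ^ M := by ring
    rw [h2, List.range_add, List.filter_append, List.map_append, pvComb]
    congr 1
    · -- lower half: leading bit '0'
      have e1 : (List.range (2 ^ M)).filter
            (fun i => ((((pvBits (M + 1) i).count '1' : Nat) : Int) == k))
          = (List.range (2 ^ M)).filter
            (fun i => ((((pvBits M i).count '1' : Nat) : Int) == k)) :=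
        List.filter_congr fun i hi => by
          rw [pvBits_low M i (List.mem_range.mp hi)]
          simp
      rw [e1, ← ih k, List.map_map]
      apply List.map_congr_left
      intro i hi
      have hi' : i < 2 ^ M := List.mem_range.mp (List.mem_of_mem_filter hi)
      simp only [Function.comp]
      rw [pvBits_low M i hi', List.map_cons, pvIntOfBit_zero]
    · -- upper half: leading bit '1'
      rw [List.filter_map, List.map_map]
      have e1 : (List.range (2 ^ M)).filter
            ((fun i => ((((pvBits (M + 1) i).count '1' : Nat) : Int) == k)) ∘
              (fun x => 2 ^ M + x))
          = (List.range (2 ^ M)).filter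
            (fun i => ((((pvBits M i).count '1' : Nat) : Int) == k - 1)) :=
        List.filter_congr fun i hi => by
          have hi' : i < 2 ^ M := List.mem_range.mp hi
          simp only [Function.comp]
          rw [Nat.add_comm (2 ^ M) i, pvBits_high M i hi']
          have hcc : List.count '1' ('1' :: pvBits M i) = List.count '1' (pvBits M i) + 1 := by
            simp
          rw [hcc]
          exact Bool.coe_iff_coe.mp (by simp only [beq_iff_eq]; push_cast; omega)
      rw [e1, ← ih (k - 1), List.map_map]
      apply List.map_congr_left
      intro i hi
      have hi' : i < 2 ^ M := List.mem_range.mp (List.mem_of_mem_filter hi)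
      simp only [Function.comp]
      rw [Nat.add_comm (2 ^ M) i, pvBits_high M i hi', List.map_cons, pvIntOfBit_one]

lemma pv_A_eq (k : Int) : generate_edge_weights k =
    ((List.range (2 ^ 20)).filter
        (fun i => ((((pvBits 20 i).count '1' : Nat) : Int) == k))).map
      (fun i => (pvBits 20 i).map pvIntOfBit) := by
  simp only [generate_edge_weights, PySem.List.pyRange_one]
  have hN : ((2 ^ 20 - 0 : Int)).toNat = 2 ^ 20 := rfl
  rw [hN, List.foldl_map]
  rw [pv_foldl_cons_if
    (fun x : Nat => ((List.count '1' (PySem.Chars.zfill (PySem.Int.toBinChars (0 + (x : Int))) 20) : Int) == k))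
    (fun x : Nat => (PySem.Chars.zfill (PySem.Int.toBinChars (0 + (x : Int))) 20).map pvIntOfBit)
    (List.range (2 ^ 20)) []]
  rw [List.append_nil, List.reverse_reverse]
  have key : ∀ i : Nat, i < 2 ^ 20 →
      PySem.Chars.zfill (PySem.Int.toBinChars (0 + (i : Int))) 20 = pvBits 20 i := by
    intro i hi
    have h0 : (0 : Int) + (i : Int) = (i : Int) := by ring
    have h1 : PySem.Int.toBinChars (i : Int) = Nat.toDigits 2 i := by
      rw [PySem.Int.toBinChars]
      rw [if_neg (by omega)]
      simp
    rw [h0, h1, pv_toDigits2_eq, pv_zfill_pvGo]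
    have : ((20 : Int)).toNat = 20 := rfl
    rw [this]
    exact pv_pad_eq 20 i hi (by norm_num)
  have e1 : (List.range (2 ^ 20)).filter
        (fun x : Nat => ((List.count '1' (PySem.Chars.zfill (PySem.Int.toBinChars (0 + (x : Int))) 20) : Int) == k))
      = (List.range (2 ^ 20)).filter
        (fun i => ((((pvBits 20 i).count '1' : Nat) : Int) == k)) :=
    List.filter_congr fun i hi => by
      rw [key i (List.mem_range.mp hi)]
  rw [e1]
  apply List.map_congr_left
  intro i hi
  have hi' : i < 2 ^ 20 := List.mem_range.mp (List.mem_of_mem_filter hi)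
  rw [key i hi']

-- ===== VERDICT (by name: the statement is the Claim_ definition above) =====
theorem generate_edge_weights_spec : Claim_equal_generate_edge_weights := by
  intro k _
  show generate_edge_weights k = generate_edge_weights_alt k
  have hB : generate_edge_weights_alt k = pvComb 20 k := by
    rw [generate_edge_weights_alt, pvRecB_eq]
    simp
  rw [hB, pv_A_eq k, pv_A_filter 20 k]
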